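-- pv_equiv track=rewrite | github.com/tinylabs/fan_controller | code16/analyze_model16.py | split_by_long_ones
-- ===== SOURCE A (Python) =====
-- from itertools import groupby
--
-- def rle(bits: str):
--     return [(k, len(list(g))) for k, g in groupby(bits)]
--
-- def split_by_long_ones(bits: str, min_ones: int = 10):
--     runs = rle(bits)
--     segs, pos, last = [], 0, 0
--     for v, l in runs:
--         if v == '1' and l >= min_ones:
--             segs.append(bits[last:pos])
--             last = pos + l
--         pos += l
--     segs.append(bits[last:])
--     return [s for s in segs if s and s.count('1') > 0]
-- ===== SOURCE B (Python) =====
-- def split_by_long_ones(bits: str, min_ones: int = 10):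
--     # single left-to-right scan; a pending counter of trailing '1's replaces the RLE table
--     t = max(min_ones, 1)
--     out = []
--     seg = []
--     run = 0
--     for c in bits:
--         if c == '1':
--             run += 1
--         else:
--             if run >= t:
--                 if '1' in seg:
--                     out.append(''.join(seg))
--                 seg = []
--             else:
--                 seg.extend('1' * run)
--             seg.append(c)
--             run = 0
--     if run >= t:
--         if '1' in seg:
--             out.append(''.join(seg))
--     else:
--         seg.extend('1' * run)
--         if '1' in seg:
--             out.append(''.join(seg))
--     return out
-- ===== Notes on version B (the rewrite author's own statement) =====
-- stated objective: simpler
-- what changed: Replaces A's groupby RLE table plus slice/position arithmetic with a single left-to-right character scan that keeps a pending counter of trailing ones and emits segments as it goes.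
import Mathlib
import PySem

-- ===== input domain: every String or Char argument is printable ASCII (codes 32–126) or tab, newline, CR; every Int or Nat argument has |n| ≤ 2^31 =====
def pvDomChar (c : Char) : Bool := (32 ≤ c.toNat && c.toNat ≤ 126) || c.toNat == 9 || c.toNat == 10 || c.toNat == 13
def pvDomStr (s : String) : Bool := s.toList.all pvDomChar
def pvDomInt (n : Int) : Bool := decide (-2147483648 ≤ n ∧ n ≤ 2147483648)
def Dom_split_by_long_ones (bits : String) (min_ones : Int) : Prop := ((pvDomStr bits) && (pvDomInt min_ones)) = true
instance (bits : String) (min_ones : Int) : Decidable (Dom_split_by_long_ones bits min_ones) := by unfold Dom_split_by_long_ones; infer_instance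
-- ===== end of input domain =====

-- B replaces A's RLE table and slice-position arithmetic by a single left-to-right scan
-- with a pending counter of trailing ones (objective: simpler one-pass decomposition).

-- ===== PORT A =====
-- itertools.groupby(bits) with each group measured by len(list(g)) (the helper rle)
def pyGroupbyLens : List Char → List (Char × Nat)
  | [] => []
  | c :: rest =>
    (c, 1 + (rest.takeWhile (· == c)).length) :: pyGroupbyLens (rest.dropWhile (· == c))
termination_by l => l.length
decreasing_by
  simp only [List.length_cons]
  exact Nat.lt_succ_of_le (List.length_dropWhile_le _ _)

-- the body of A's for-loop over runs, state (segs, pos, last)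
def aStep (cs : List Char) (min_ones : Int) (st : List (List Char) × Int × Int)
    (r : Char × Nat) : List (List Char) × Int × Int :=
  if r.1 = '1' ∧ (r.2 : Int) ≥ min_ones then
    (st.1 ++ [PySem.List.slice cs (some st.2.2) (some st.2.1)], st.2.1 + (r.2 : Int), st.2.1 + (r.2 : Int))
  else
    (st.1, st.2.1 + (r.2 : Int), st.2.2)

def split_by_long_ones (bits : String) (min_ones : Int) : List String :=
  let cs := bits.toList
  let runs := pyGroupbyLens cs
  let st := runs.foldl (aStep cs min_ones) ([], 0, 0)
  let segs := st.1 ++ [PySem.List.slice cs (some st.2.2) none]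
  (segs.filter (fun s => decide (s ≠ []) && decide (0 < PySem.Chars.count s ['1']))).map String.ofList

-- ===== PORT B =====
-- the body of B's for-loop, state (out, seg, run)
def altStep (t : Int) (st : List (List Char) × List Char × Int) (c : Char) :
    List (List Char) × List Char × Int :=
  if c = '1' then (st.1, st.2.1, st.2.2 + 1)
  else
    let os :=
      if st.2.2 ≥ t then
        (if '1' ∈ st.2.1 then st.1 ++ [st.2.1] else st.1, ([] : List Char))
      else (st.1, st.2.1 ++ List.replicate st.2.2.toNat '1')
    (os.1, os.2 ++ [c], 0)

-- B's code after the loop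
def altFinish (t : Int) (st : List (List Char) × List Char × Int) : List (List Char) :=
  if st.2.2 ≥ t then (if '1' ∈ st.2.1 then st.1 ++ [st.2.1] else st.1)
  else
    let seg := st.2.1 ++ List.replicate st.2.2.toNat '1'
    if '1' ∈ seg then st.1 ++ [seg] else st.1

def split_by_long_ones_alt (bits : String) (min_ones : Int) : List String :=
  let t := max min_ones 1
  (altFinish t (bits.toList.foldl (altStep t) ([], [], 0))).map String.ofList

-- ===== PRECONDITION & SPEC =====
def Spec_split_by_long_ones (bits : String) (min_ones : Int) (out : List String) : Prop := out = split_by_long_ones_alt bits min_ones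
instance (bits : String) (min_ones : Int) (out : List String) : Decidable (Spec_split_by_long_ones bits min_ones out) := by unfold Spec_split_by_long_ones; infer_instance

-- ===== CLAIM (what is proved, stated in full; the proofs are below) =====
def Claim_equal_split_by_long_ones : Prop := ∀ (bits : String) (min_ones : Int), Dom_split_by_long_ones bits min_ones → Spec_split_by_long_ones bits min_ones (split_by_long_ones bits min_ones)

-- ===== LEMMAS AND PROOFS =====

-- the characters a run list denotes
def render (runs : List (Char × Nat)) : List Char :=
  runs.flatMap (fun r => List.replicate r.2 r.1)

-- common specification: (finished segments, pending segment) after splitting at long 1-runs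
def asplit (m : Int) : List (Char × Nat) → List Char → List (List Char) × List Char
  | [], cur => ([], cur)
  | r :: rs, cur =>
    if r.1 = '1' ∧ (r.2 : Int) ≥ m then
      ((cur :: (asplit m rs []).1), (asplit m rs []).2)
    else asplit m rs (cur ++ List.replicate r.2 r.1)

-- a well-formed RLE: positive lengths, adjacent keys distinct
inductive RValid : List (Char × Nat) → Prop
  | nil : RValid []
  | cons (v : Char) (l : Nat) (rs : List (Char × Nat)) :
      1 ≤ l → (∀ w k rs', rs = (w, k) :: rs' → w ≠ v) → RValid rs → RValid ((v, l) :: rs)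

theorem render_nil : render [] = [] := rfl

theorem render_cons (v : Char) (l : Nat) (rs : List (Char × Nat)) :
    render ((v, l) :: rs) = List.replicate l v ++ render rs := rfl

theorem pyGroupbyLens_head (l : List Char) (v : Char) (k : Nat) (rs : List (Char × Nat))
    (h : pyGroupbyLens l = (v, k) :: rs) : ∃ t, l = v :: t := by
  cases l with
  | nil => simp [pyGroupbyLens] at h
  | cons c rest =>
    rw [pyGroupbyLens] at h
    injection h with h1 h2
    injection h1 with hv hk
    exact ⟨rest, by rw [hv]⟩

theorem replicate_takeWhile (c : Char) (rest : List Char) :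
    List.replicate (1 + (rest.takeWhile (· == c)).length) c = c :: rest.takeWhile (· == c) := by
  rw [Nat.add_comm, List.replicate_succ]
  congr 1
  symm
  exact List.eq_replicate_of_mem (fun b hb => by
    have := List.mem_takeWhile_imp hb; simpa using this)

theorem render_pyGroupbyLens (l : List Char) : render (pyGroupbyLens l) = l := by
  induction l using pyGroupbyLens.induct with
  | case1 => rw [pyGroupbyLens]; rfl
  | case2 c rest ih =>
    rw [pyGroupbyLens, render_cons, ih, replicate_takeWhile]
    simp [List.takeWhile_append_dropWhile]

theorem rvalid_pyGroupbyLens (l : List Char) : RValid (pyGroupbyLens l) := by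
  induction l using pyGroupbyLens.induct with
  | case1 => rw [pyGroupbyLens]; exact RValid.nil
  | case2 c rest ih =>
    rw [pyGroupbyLens]
    refine RValid.cons _ _ _ (by omega) ?_ ih
    intro w k rs' hrs
    obtain ⟨t, ht⟩ := pyGroupbyLens_head _ _ _ _ hrs
    have hne : (rest.dropWhile (· == c)) ≠ [] := by rw [ht]; simp
    have := List.head_dropWhile_not (· == c) hne
    simp [ht] at this
    exact fun he => absurd (he ▸ this) (by simp)

-- s.count('1') counts the occurrences of the character '1'
theorem countGo_one (l : List Char) : ∀ (fuel acc : Nat), l.length ≤ fuel →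
    PySem.Chars.count.go ['1'] fuel l acc = acc + l.count '1' := by
  induction l with
  | nil =>
    intro fuel acc _
    cases fuel <;> simp [PySem.Chars.count.go]
  | cons h t ih =>
    intro fuel acc hf
    cases fuel with
    | zero => simp at hf
    | succ f =>
      rw [PySem.Chars.count.go]
      by_cases hh : h = '1'
      · subst hh
        simp only [List.isPrefixOf, BEq.rfl, Bool.true_and, if_true,
          List.length_singleton, List.drop_one, List.tail_cons]
        rw [ih f (acc + 1) (by simpa using Nat.lt_succ_iff.mp (Nat.lt_of_lt_of_le (by simp) hf))]
        simp
        omega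
      · have : (['1'].isPrefixOf (h :: t)) = false := by
          simp [List.isPrefixOf]
          exact fun hc => absurd hc.symm hh
        rw [this]
        simp only [Bool.false_eq_true, if_false]
        rw [ih f acc (by simpa using Nat.succ_le_succ_iff.mp hf)]
        simp [hh]

-- A's filter predicate agrees with B's membership test
theorem filter_cond_eq (s : List Char) :
    (decide (s ≠ []) && decide (0 < PySem.Chars.count s ['1'])) = decide ('1' ∈ s) := by
  have hc : PySem.Chars.count s ['1'] = s.count '1' := by
    rw [PySem.Chars.count]
    simp only [List.isEmpty_cons, if_false, Bool.false_eq_true]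
    simpa using countGo_one s s.length 0 le_rfl
  rw [hc]
  by_cases hm : '1' ∈ s
  · have : s ≠ [] := by rintro rfl; simp at hm
    simp [hm, this, List.count_pos_iff.mpr hm]
  · simp [hm]

-- ===== A side =====
theorem mainA (m : Int) : ∀ (runs : List (Char × Nat)) (pre cur : List Char) (segs : List (List Char)),
    List.foldl (aStep (pre ++ cur ++ render runs) m)
        (segs, ((pre.length + cur.length : Nat) : Int), ((pre.length : Nat) : Int)) runs
      = (segs ++ (asplit m runs cur).1,
         (((pre ++ cur ++ render runs).length : Nat) : Int),
         (((pre ++ cur ++ render runs).length - (asplit m runs cur).2.length : Nat) : Int))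
    ∧ (asplit m runs cur).2 <:+ (pre ++ cur ++ render runs) := by
  intro runs
  induction runs with
  | nil =>
    intro pre cur segs
    refine ⟨?_, ?_⟩
    · simp only [asplit, render_nil, List.foldl_nil, List.append_nil, List.length_append,
        Prod.mk.injEq]
      refine ⟨by trivial, by trivial, by omega⟩
    · simp only [asplit, render_nil, List.append_nil]
      exact List.suffix_append pre cur
  | cons r rs ih =>
    intro pre cur segs
    obtain ⟨v, l⟩ := r
    rw [List.foldl_cons]
    by_cases hcond : v = '1' ∧ (l : Int) ≥ m
    · -- long run: a segment is emitted
      have hb : pre ++ cur ++ render ((v, l) :: rs)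
          = pre ++ (cur ++ (List.replicate l v ++ render rs)) := by
        simp [render_cons]
      have hstep : aStep (pre ++ cur ++ render ((v, l) :: rs)) m
            (segs, ((pre.length + cur.length : Nat) : Int), ((pre.length : Nat) : Int)) (v, l)
          = (segs ++ [cur], (((pre.length + cur.length + l : Nat)) : Int),
             (((pre.length + cur.length + l : Nat)) : Int)) := by
        simp only [aStep, if_pos hcond]
        rw [PySem.List.slice_natCast, hb, List.drop_left, Nat.add_sub_cancel_left,
          List.take_left]
        simp only [Prod.mk.injEq]
        refine ⟨by trivial, by push_cast; ring, by push_cast; ring⟩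
      rw [hstep]
      have hbits : pre ++ cur ++ render ((v, l) :: rs)
          = (pre ++ cur ++ List.replicate l v) ++ [] ++ render rs := by
        rw [render_cons]; simp
      have hIH := ih (pre ++ cur ++ List.replicate l v) [] (segs ++ [cur])
      have hp1 : (((pre ++ cur ++ List.replicate l v).length + ([] : List Char).length : Nat) : Int)
          = ((pre.length + cur.length + l : Nat) : Int) := by simp; ring
      have hp2 : (((pre ++ cur ++ List.replicate l v).length : Nat) : Int)
          = ((pre.length + cur.length + l : Nat) : Int) := by simp; ring
      rw [hp1, hp2] at hIH
      rw [asplit, if_pos hcond, hbits]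
      refine ⟨?_, hIH.2⟩
      rw [hIH.1]
      simp
    · -- short run: it is appended to the pending segment
      have hstep : aStep (pre ++ cur ++ render ((v, l) :: rs)) m
            (segs, ((pre.length + cur.length : Nat) : Int), ((pre.length : Nat) : Int)) (v, l)
          = (segs, (((pre.length + (cur ++ List.replicate l v).length : Nat)) : Int),
             ((pre.length : Nat) : Int)) := by
        simp only [aStep, if_neg hcond, Prod.mk.injEq]
        refine ⟨by trivial, by push_cast; simp; ring, by trivial⟩
      rw [hstep]
      have hbits : pre ++ cur ++ render ((v, l) :: rs)
          = pre ++ (cur ++ List.replicate l v) ++ render rs := by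
        rw [render_cons]; simp
      have hIH := ih pre (cur ++ List.replicate l v) segs
      rw [asplit, if_neg hcond, hbits]
      exact hIH

-- ===== B side =====
def flushB (t : Int) (out : List (List Char)) (seg : List Char) (run : Int) :
    List (List Char) × List Char :=
  if run ≥ t then (if '1' ∈ seg then out ++ [seg] else out, [])
  else (out, seg ++ List.replicate run.toNat '1')

theorem altStep_one (t : Int) (st : List (List Char) × List Char × Int) :
    altStep t st '1' = (st.1, st.2.1, st.2.2 + 1) := by
  simp [altStep]

theorem altStep_other (t : Int) (out : List (List Char)) (seg : List Char) (run : Int)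
    (c : Char) (hc : c ≠ '1') :
    altStep t (out, seg, run) c
      = ((flushB t out seg run).1, (flushB t out seg run).2 ++ [c], 0) := by
  simp [altStep, flushB, hc]

theorem flushB_zero (t : Int) (ht : 1 ≤ t) (out : List (List Char)) (seg : List Char) :
    flushB t out seg 0 = (out, seg) := by
  simp [flushB]
  omega

theorem foldB_ones (t : Int) (n : Nat) :
    ∀ (out : List (List Char)) (seg : List Char) (run : Int),
      List.foldl (altStep t) (out, seg, run) (List.replicate n '1') = (out, seg, run + n) := by
  induction n with
  | zero => intro out seg run; simp
  | succ n ih =>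
    intro out seg run
    rw [List.replicate_succ, List.foldl_cons, altStep_one]
    rw [ih]
    simp [Prod.ext_iff]
    ring

theorem altFinish_flush (t : Int) (ht : 1 ≤ t) (out : List (List Char)) (seg : List Char)
    (run : Int) :
    altFinish t (out, seg, run) = altFinish t ((flushB t out seg run).1, (flushB t out seg run).2, 0) := by
  by_cases hr : run ≥ t
  · simp only [altFinish, flushB, if_pos hr]
    rw [if_neg (by omega : ¬ (0:Int) ≥ t)]
    simp
  · simp only [altFinish, flushB, if_neg hr]
    rw [if_neg (by omega : ¬ (0:Int) ≥ t)]
    simp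

theorem foldB_shift (t : Int) (ht : 1 ≤ t) (xs : List Char)
    (hx : ∀ c t', xs = c :: t' → c ≠ '1') (out : List (List Char)) (seg : List Char) (run : Int) :
    altFinish t (List.foldl (altStep t) (out, seg, run) xs)
      = altFinish t (List.foldl (altStep t) ((flushB t out seg run).1, (flushB t out seg run).2, 0) xs) := by
  cases xs with
  | nil => simpa using altFinish_flush t ht out seg run
  | cons c t' =>
    have hc : c ≠ '1' := hx c t' rfl
    rw [List.foldl_cons, List.foldl_cons, altStep_other _ _ _ _ _ hc, altStep_other _ _ _ _ _ hc,
      flushB_zero t ht]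

theorem render_head_ne_one (rs : List (Char × Nat)) (hv : RValid rs)
    (h1 : ∀ w k rs', rs = (w, k) :: rs' → w ≠ '1') :
    ∀ c t', render rs = c :: t' → c ≠ '1' := by
  intro c t' hr
  cases rs with
  | nil => simp [render_nil] at hr
  | cons r rs' =>
    obtain ⟨w, k⟩ := r
    cases hv with
    | cons _ _ _ hk _ _ =>
      rw [render_cons] at hr
      cases k with
      | zero => omega
      | succ k' =>
        rw [List.replicate_succ] at hr
        simp at hr
        exact hr.1 ▸ h1 w (k' + 1) rs' rfl

theorem foldB_other_zero (t : Int) (ht : 1 ≤ t) (c : Char) (hc : c ≠ '1') (n : Nat) :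
    ∀ (out : List (List Char)) (seg : List Char),
      List.foldl (altStep t) (out, seg, 0) (List.replicate n c) = (out, seg ++ List.replicate n c, 0) := by
  induction n with
  | zero => intro out seg; simp
  | succ n ih =>
    intro out seg
    rw [List.replicate_succ, List.foldl_cons, altStep_other _ _ _ _ _ hc, flushB_zero t ht, ih]
    simp

theorem mainB (m t : Int) (ht : t = max m 1) :
    ∀ (runs : List (Char × Nat)), RValid runs →
    ∀ (out : List (List Char)) (seg : List Char),
      altFinish t (List.foldl (altStep t) (out, seg, 0) (render runs))
        = out ++ ((asplit m runs seg).1 ++ [(asplit m runs seg).2]).filter (fun s => decide ('1' ∈ s)) := by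
  have ht1 : (1:Int) ≤ t := by omega
  intro runs
  induction runs with
  | nil =>
    intro _ out seg
    simp only [render_nil, List.foldl_nil, asplit, altFinish]
    rw [if_neg (by omega : ¬ (0:Int) ≥ t)]
    by_cases hm : '1' ∈ seg <;> simp [hm]
  | cons r rs ih =>
    intro hv out seg
    obtain ⟨v, l⟩ := r
    have hl : 1 ≤ l := by cases hv with | cons _ _ _ hl _ _ => exact hl
    have hhead : ∀ w k rs', rs = (w, k) :: rs' → w ≠ v := by
      cases hv with | cons _ _ _ _ hh _ => exact hh
    have hvrs : RValid rs := by cases hv with | cons _ _ _ _ _ h => exact h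
    by_cases hv1 : v = '1'
    · subst hv1
      rw [render_cons, List.foldl_append, foldB_ones]
      rw [foldB_shift t ht1 _ (render_head_ne_one rs hvrs hhead)]
      rw [ih hvrs]
      by_cases hlm : (l : Int) ≥ m
      · have hlt : (0:Int) + (l:Nat) ≥ t := by omega
        rw [asplit, if_pos ⟨rfl, hlm⟩]
        simp only [flushB, if_pos hlt]
        by_cases hm : '1' ∈ seg <;> simp [hm]
      · have hlt : ¬ ((0:Int) + (l:Nat) ≥ t) := by omega
        rw [asplit, if_neg (by intro h; exact hlm h.2)]
        simp only [flushB, if_neg hlt]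
        simp
    · rw [render_cons, List.foldl_append, foldB_other_zero t ht1 v hv1, ih hvrs]
      rw [asplit, if_neg (by intro h; exact hv1 h.1)]

-- ===== VERDICT (by name: the statement is the Claim_ definition above) =====
theorem split_by_long_ones_spec : Claim_equal_split_by_long_ones := by
  intro bits m _
  show split_by_long_ones bits m = split_by_long_ones_alt bits m
  simp only [split_by_long_ones, split_by_long_ones_alt]
  have hren : (([] : List Char) ++ [] ++ render (pyGroupbyLens bits.toList)) = bits.toList := by
    simp [render_pyGroupbyLens]
  have hA := mainA m (pyGroupbyLens bits.toList) [] [] []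
  rw [hren] at hA
  norm_num at hA
  rw [hA.1]
  dsimp only
  rw [PySem.List.slice_from_natCast]
  have hdrop : ∀ P : List Char, P <:+ bits.toList →
      bits.toList.drop (bits.length - P.length) = P := by
    intro P hP
    obtain ⟨q, hq⟩ := hP
    have hlen : bits.length - P.length = q.length := by
      have h2 := congrArg List.length hq
      simp at h2
      omega
    rw [← hq, hlen, List.drop_left]
  rw [hdrop _ hA.2]
  -- B's scan computes the filtered split
  have hB := mainB m (max m 1) rfl (pyGroupbyLens bits.toList) (rvalid_pyGroupbyLens _) [] []
  rw [render_pyGroupbyLens] at hB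
  rw [hB]
  rw [List.filter_congr (fun s _ => filter_cond_eq s)]
  simp
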